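-- pv_equiv track=rewrite | github.com/aciderix/Graph-Systems-Exploration | numerical_semigroups/phases/N7_verify_d9d10.py | construct_achiever
-- ===== SOURCE A (Python) =====
-- def construct_achiever(m, d, k, level1_residues, decomp_residues):
--     """Construct the Kunz tuple for the achiever."""
--     n = m - 1
--     kunz = [0] * n
--
--     level1_set = set(level1_residues)
--     decomp_set = set(decomp_residues)
--
--     for i in range(n):
--         res = i + 1
--         if res in level1_set:
--             kunz[i] = 1
--         else:
--             kunz[i] = 2  # level 2 (both generators and decomposable)
--
--     return tuple(kunz)
-- ===== SOURCE B (Python) =====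
-- def construct_achiever(m, d, k, level1_residues, decomp_residues):
--     """Construct the Kunz tuple for the achiever (scatter form)."""
--     n = m - 1
--     kunz = [2] * n
--     for r in level1_residues:
--         if 1 <= r <= n:
--             kunz[r - 1] = 1
--     return tuple(kunz)
-- ===== Notes on version B (the rewrite author's own statement) =====
-- stated objective: simpler
-- what changed: Instead of scanning every position 1..m-1 and testing set membership, B starts from a default level-2 array and scatters the 1-marks directly from the residue list (no sets built).
import Mathlib
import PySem

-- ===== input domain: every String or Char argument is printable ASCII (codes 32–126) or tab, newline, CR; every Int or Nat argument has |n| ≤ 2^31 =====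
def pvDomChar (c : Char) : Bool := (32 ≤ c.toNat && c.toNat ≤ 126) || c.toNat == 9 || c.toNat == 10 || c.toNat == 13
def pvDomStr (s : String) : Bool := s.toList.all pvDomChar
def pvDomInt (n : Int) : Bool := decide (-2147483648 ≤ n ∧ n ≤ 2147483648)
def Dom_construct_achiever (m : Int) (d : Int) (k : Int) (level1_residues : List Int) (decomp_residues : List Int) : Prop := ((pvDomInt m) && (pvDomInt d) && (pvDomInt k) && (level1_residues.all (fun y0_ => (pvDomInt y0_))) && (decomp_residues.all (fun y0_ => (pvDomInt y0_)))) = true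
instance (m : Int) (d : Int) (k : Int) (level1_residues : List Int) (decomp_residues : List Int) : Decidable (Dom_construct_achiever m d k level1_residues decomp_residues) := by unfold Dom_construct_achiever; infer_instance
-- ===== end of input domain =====

-- B replaces A's scan of every position with membership tests by a scatter of
-- 1-marks from the residue list onto a default level-2 array (objective: simpler).

-- ===== PORT A =====
def construct_achiever (m : Int) (d : Int) (k : Int) (level1_residues : List Int) (decomp_residues : List Int) : List Int :=
  let n := m - 1
  let kunz := List.replicate n.toNat (0 : Int)   -- [0] * n ([] when n < 0)
  let level1_set := PySem.Set.ofList level1_residues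
  let _decomp_set := PySem.Set.ofList decomp_residues
  (PySem.List.pyRange 0 n 1).foldl (fun ks i =>
    let res := i + 1
    if level1_set.contains res then ks.set i.toNat 1 else ks.set i.toNat 2) kunz

-- ===== PORT B =====
def construct_achiever_alt (m : Int) (d : Int) (k : Int) (level1_residues : List Int) (decomp_residues : List Int) : List Int :=
  let n := m - 1
  let kunz := List.replicate n.toNat (2 : Int)   -- [2] * n ([] when n < 0)
  level1_residues.foldl (fun ks r =>
    if 1 ≤ r ∧ r ≤ n then ks.set (r - 1).toNat 1 else ks) kunz

-- ===== PRECONDITION & SPEC =====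
def Spec_construct_achiever (m : Int) (d : Int) (k : Int) (level1_residues : List Int) (decomp_residues : List Int) (out : List Int) : Prop := out = construct_achiever_alt m d k level1_residues decomp_residues
instance (m : Int) (d : Int) (k : Int) (level1_residues : List Int) (decomp_residues : List Int) (out : List Int) : Decidable (Spec_construct_achiever m d k level1_residues decomp_residues out) := by unfold Spec_construct_achiever; infer_instance

-- ===== CLAIM (what is proved, stated in full; the proofs are below) =====
def Claim_equal_construct_achiever : Prop := ∀ (m : Int) (d : Int) (k : Int) (level1_residues : List Int) (decomp_residues : List Int), Dom_construct_achiever m d k level1_residues decomp_residues → Spec_construct_achiever m d k level1_residues decomp_residues (construct_achiever m d k level1_residues decomp_residues)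

-- ===== LEMMAS AND PROOFS =====

-- A's loop writes position i once per visited index i ≥ 0; value depends only on i.
theorem foldlA_getElem? (c : Int → Bool) (L : List Int) :
    ∀ (ks : List Int) (j : Nat), (∀ i ∈ L, 0 ≤ i) →
    (L.foldl (fun ks i => if c (i + 1) then ks.set i.toNat 1 else ks.set i.toNat 2) ks)[j]? =
      if (j : Int) ∈ L then (if j < ks.length then some (if c ((j : Int) + 1) then (1:Int) else 2) else none) else ks[j]? := by
  induction L with
  | nil => intro ks j _; simp
  | cons r L ih =>
    intro ks j hpos
    have hr : 0 ≤ r := hpos r (by simp)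
    have hL : ∀ i ∈ L, 0 ≤ i := fun i hi => hpos i (by simp [hi])
    simp only [List.foldl_cons]
    rw [ih _ j hL]
    have hlf : (if c (r + 1) then ks.set r.toNat 1 else ks.set r.toNat 2).length = ks.length := by
      split_ifs <;> simp
    rw [hlf]
    have hgs : (if c (r + 1) then ks.set r.toNat 1 else ks.set r.toNat 2)[j]? =
        if r.toNat = j then (if j < ks.length then some (if c (r + 1) then (1:Int) else 2) else none) else ks[j]? := by
      split_ifs with h1 h2 h3 <;>
        simp_all [List.getElem?_set] <;> omega
    rw [hgs]
    by_cases hjr : r.toNat = j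
    · have hjr' : (j : Int) = r := by omega
      simp only [List.mem_cons, hjr, hjr']
      split_ifs <;> simp_all
    · have hjr' : ¬ ((j : Int) = r) := by omega
      simp only [List.mem_cons, hjr, hjr']
      split_ifs <;> simp_all

-- B's loop only ever writes the value 1, at position r-1 for in-range residues r.
theorem foldlB_getElem? (n : Int) (L : List Int) :
    ∀ (ks : List Int) (j : Nat),
    (L.foldl (fun ks r => if 1 ≤ r ∧ r ≤ n then ks.set (r - 1).toNat 1 else ks) ks)[j]? =
      if ((j : Int) + 1 ∈ L ∧ (j : Int) + 1 ≤ n ∧ j < ks.length) then some (1:Int) else ks[j]? := by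
  induction L with
  | nil => intro ks j; simp
  | cons r L ih =>
    intro ks j
    simp only [List.foldl_cons]
    rw [ih]
    have hlf : (if 1 ≤ r ∧ r ≤ n then ks.set (r - 1).toNat 1 else ks).length = ks.length := by
      split_ifs <;> simp
    rw [hlf]
    by_cases h1 : 1 ≤ r ∧ r ≤ n
    · rw [if_pos h1]
      rw [List.getElem?_set]
      have hidx : ((r - 1).toNat = j) ↔ ((j : Int) + 1 = r) := by omega
      have hlt : ((r - 1).toNat < ks.length) ↔ ((r - 1).toNat < ks.length) := Iff.rfl
      by_cases hjr : (j : Int) + 1 = r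
      · have hj : (r - 1).toNat = j := hidx.mpr hjr
        have hn : (j : Int) + 1 ≤ n := hjr ▸ h1.2
        simp only [List.mem_cons, hj, hjr, hn]
        split_ifs <;> simp_all <;> omega
      · have hj : ¬ ((r - 1).toNat = j) := fun h => hjr (hidx.mp h)
        simp only [List.mem_cons, hj, if_false]
        split_ifs <;> simp_all
    · rw [if_neg h1]
      simp only [List.mem_cons]
      split_ifs <;> simp_all <;> omega

-- ===== VERDICT (by name: the statement is the Claim_ definition above) =====
theorem construct_achiever_spec : Claim_equal_construct_achiever := by
  intro m d k level1_residues decomp_residues _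
  unfold Spec_construct_achiever construct_achiever construct_achiever_alt
  simp only []
  apply List.ext_getElem?
  intro j
  rw [foldlA_getElem? _ _ _ _ (fun i hi => (PySem.List.mem_pyRange_one.mp hi).1),
      foldlB_getElem?]
  have hlen : (List.replicate (m - 1).toNat (0:Int)).length = (m - 1).toNat := by simp
  have hlen2 : (List.replicate (m - 1).toNat (2:Int)).length = (m - 1).toNat := by simp
  by_cases hj : j < (m - 1).toNat
  · have hmem : (j : Int) ∈ PySem.List.pyRange 0 (m - 1) 1 := by
      rw [PySem.List.mem_pyRange_one]; omega
    have hle : (j : Int) + 1 ≤ m - 1 := by omega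
    simp only [hmem, hlen, hlen2, hj, if_pos, hle]
    by_cases hc : ((j : Int) + 1) ∈ level1_residues
    · have : (PySem.Set.ofList level1_residues).contains ((j : Int) + 1) = true := by
        simp [PySem.Set.contains, PySem.Set.mem_ofList, hc]
      simp [this, hc]
    · have : (PySem.Set.ofList level1_residues).contains ((j : Int) + 1) = false := by
        simp [PySem.Set.contains, PySem.Set.mem_ofList, hc]
      simp only [this, hc, Bool.false_eq_true, if_false, false_and, and_true, hj]
      have hm : (j : Int) + 1 < m := by omega
      simp [hm, List.getElem?_replicate, hj]
  · have hmem : ¬ (j : Int) ∈ PySem.List.pyRange 0 (m - 1) 1 := by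
      rw [PySem.List.mem_pyRange_one]; omega
    have hj' : ¬ j < m.toNat - 1 := by omega
    simp [hmem, List.getElem?_replicate, hj', hj]
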